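-- pv_equiv track=rewrite | github.com/DNA-origamicon/NADOC | backend/core/lattice.py | _strand_domain_lens
-- ===== SOURCE A (Python) =====
-- def _strand_domain_lens(positions: list) -> list[int]:
--     """Return the length of each contiguous helix run in a nucleotide position list."""
--     if not positions:
--         return []
--     lens, count = [], 1
--     for i in range(1, len(positions)):
--         if positions[i][0] == positions[i - 1][0]:
--             count += 1
--         else:
--             lens.append(count)
--             count = 1
--     lens.append(count)
--     return lens
-- ===== SOURCE B (Python) =====
-- def _strand_domain_lens(positions: list) -> list[int]:
--     """Return the length of each contiguous helix run in a nucleotide position list."""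
--     keys = [p[0] for p in positions]
--     lens = []
--     while keys:
--         k = keys[0]
--         rest = keys[1:]
--         run = 1
--         while rest and rest[0] == k:
--             run += 1
--             rest = rest[1:]
--         lens.append(run)
--         keys = rest
--     return lens
-- ===== Notes on version B (the rewrite author's own statement) =====
-- stated objective: alternative
-- what changed: A walks indices 1..n-1 comparing adjacent first-elements with a running counter flushed on change; B first projects the key list [p[0] for p in positions] and then consumes it run by run, scanning each maximal run to its end and dropping it, so no adjacent-pair comparison or flush-at-end counter remains.
-- outside the precondition, e.g. on _strand_domain_lens([[]]): A returns [1], B raises IndexError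
import Mathlib
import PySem

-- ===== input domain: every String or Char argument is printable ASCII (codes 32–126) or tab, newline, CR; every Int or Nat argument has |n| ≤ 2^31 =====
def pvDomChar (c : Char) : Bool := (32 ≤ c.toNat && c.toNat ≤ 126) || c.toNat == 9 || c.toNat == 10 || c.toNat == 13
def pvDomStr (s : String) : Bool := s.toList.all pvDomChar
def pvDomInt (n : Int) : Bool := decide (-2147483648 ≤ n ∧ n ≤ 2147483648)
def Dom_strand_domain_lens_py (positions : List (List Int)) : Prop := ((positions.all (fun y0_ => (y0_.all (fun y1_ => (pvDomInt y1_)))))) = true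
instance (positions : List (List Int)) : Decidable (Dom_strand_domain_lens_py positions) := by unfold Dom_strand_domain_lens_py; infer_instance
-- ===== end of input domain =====

-- B replaces A's index loop over adjacent pairs (running counter, flushed on key change)
-- by projecting the key list once and consuming it maximal run by maximal run (objective: alternative).
-- Equivalence is about the return value only; neither program mutates its argument.

-- ===== PORT A =====
-- for i in range(1, len(positions)): compare positions[i][0] with positions[i-1][0]
def strand_domain_lens_py (positions : List (List Int)) : List Int :=
  if positions = [] then []
  else
    let s := (PySem.List.pyRange 1 (positions.length : Int) 1).foldl
      (fun (s : List Int × Int) i =>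
        if PySem.List.pyGetD (PySem.List.pyGetD positions i []) 0 0
           = PySem.List.pyGetD (PySem.List.pyGetD positions (i-1) []) 0 0
        then (s.1, s.2 + 1) else (s.1 ++ [s.2], 1)) ([], (1 : Int))
    s.1 ++ [s.2]

-- ===== PORT B =====
-- inner while loop of Source B: consume keys equal to k from rest, returning (run, remaining rest)
def pvCountRun (k : Int) : List Int → Int → Int × List Int
  | [], run => (run, [])
  | x :: t, run => if x = k then pvCountRun k t (run + 1) else (run, x :: t)

theorem pvCountRun_snd_le (k : Int) : ∀ (t : List Int) (run : Int), (pvCountRun k t run).2.length ≤ t.length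
  | [], _ => le_refl _
  | x :: t, run => by
    by_cases h : x = k
    · simpa [pvCountRun, h] using Nat.le_succ_of_le (pvCountRun_snd_le k t (run + 1))
    · simp [pvCountRun, h]

-- outer while loop of Source B: peel one maximal run per iteration, appending its length
def pvOuterLoop (keys lens : List Int) : List Int :=
  match keys with
  | [] => lens
  | k :: rest =>
      let r := pvCountRun k rest 1
      pvOuterLoop r.2 (lens ++ [r.1])
termination_by keys.length
decreasing_by exact Nat.lt_succ_of_le (pvCountRun_snd_le k rest 1)

def strand_domain_lens_py_alt (positions : List (List Int)) : List Int :=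
  pvOuterLoop (positions.map (fun p => PySem.List.pyGetD p 0 0)) []

-- ===== PRECONDITION & SPEC =====
-- Pre_ excludes inputs containing an empty inner list: on those Python A raises IndexError
-- except on the single accidental input [[]] (length-1 list, element never inspected) where A
-- returns [1] while B, which projects every p[0] up front, itself raises IndexError.
def Pre_strand_domain_lens_py (positions : List (List Int)) : Prop :=
  ∀ p ∈ positions, p ≠ []
instance (positions : List (List Int)) : Decidable (Pre_strand_domain_lens_py positions) := by unfold Pre_strand_domain_lens_py; infer_instance

def pvWitness_strand_domain_lens_py : List (List Int) := [[0, 5], [0, 6], [1, 7], [1, 8], [0, 9]]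

def Spec_strand_domain_lens_py (positions : List (List Int)) (out : List Int) : Prop := out = strand_domain_lens_py_alt positions
instance (positions : List (List Int)) (out : List Int) : Decidable (Spec_strand_domain_lens_py positions out) := by unfold Spec_strand_domain_lens_py; infer_instance

-- ===== CLAIM (what is proved, stated in full; the proofs are below) =====
def Claim_equal_strand_domain_lens_py : Prop := ∀ (positions : List (List Int)), Dom_strand_domain_lens_py positions → Pre_strand_domain_lens_py positions → Spec_strand_domain_lens_py positions (strand_domain_lens_py positions)

-- ===== LEMMAS AND PROOFS =====

-- reference run-length function both ports are reduced to
def pvRleAux (p c : Int) : List Int → List Int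
  | [] => [c]
  | k :: t => if k = p then pvRleAux k (c + 1) t else c :: pvRleAux k 1 t

def pvRle : List Int → List Int
  | [] => []
  | k :: t => pvRleAux k 1 t

-- ---- B side ----
theorem pvCountRun_rleAux : ∀ (t : List Int) (k c : Int),
    pvRleAux k c t = (pvCountRun k t c).1 :: pvRle (pvCountRun k t c).2
  | [], k, c => by simp [pvRleAux, pvCountRun, pvRle]
  | x :: t, k, c => by
    by_cases h : x = k
    · subst h
      simpa [pvRleAux, pvCountRun] using pvCountRun_rleAux t x (c + 1)
    · simp [pvRleAux, pvCountRun, h, pvRle]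

theorem pvOuterLoop_eq_aux : ∀ (n : Nat) (keys lens : List Int), keys.length ≤ n →
    pvOuterLoop keys lens = lens ++ pvRle keys
  | _, [], lens, _ => by simp [pvOuterLoop, pvRle]
  | 0, _ :: _, _, h => by simp at h
  | Nat.succ n, k :: rest, lens, h => by
    rw [pvOuterLoop,
        pvOuterLoop_eq_aux n _ _ (le_trans (pvCountRun_snd_le k rest 1) (by simpa using h))]
    simp [pvRle, pvCountRun_rleAux rest k 1]

theorem pvOuterLoop_eq (keys lens : List Int) : pvOuterLoop keys lens = lens ++ pvRle keys :=
  pvOuterLoop_eq_aux keys.length keys lens (le_refl _)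

theorem alt_eq_rle (positions : List (List Int)) :
    strand_domain_lens_py_alt positions = pvRle (positions.map (fun p => PySem.List.pyGetD p 0 0)) := by
  simpa [strand_domain_lens_py_alt] using pvOuterLoop_eq (positions.map (fun p => PySem.List.pyGetD p 0 0)) []

-- ---- A side ----
-- structural form of A's loop state transformation over the tail of the key list
def pvPairFold (a : Int) (t : List Int) (st : List Int × Int) : List Int × Int :=
  match t with
  | [] => st
  | b :: t' => pvPairFold b t' (if b = a then (st.1, st.2 + 1) else (st.1 ++ [st.2], 1))

theorem pvPairFold_rleAux : ∀ (t : List Int) (a : Int) (st : List Int × Int),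
    (pvPairFold a t st).1 ++ [(pvPairFold a t st).2] = st.1 ++ pvRleAux a st.2 t
  | [], a, st => by simp [pvPairFold, pvRleAux]
  | b :: t', a, st => by
    by_cases h : b = a
    · simpa [pvPairFold, pvRleAux, h] using pvPairFold_rleAux t' b (st.1, st.2 + 1)
    · simpa [pvPairFold, pvRleAux, h] using pvPairFold_rleAux t' b (st.1 ++ [st.2], 1)

theorem pvGetD_append_cons (pre : List Int) (x : Int) (r : List Int) :
    PySem.List.pyGetD (pre ++ x :: r) (pre.length : Int) 0 = x := by
  simp [List.getD]

theorem pvFoldRange (t : List Int) : ∀ (pre : List Int) (a : Int) (st : List Int × Int),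
    (PySem.List.pyRange ((pre.length : Int) + 1) ((pre.length : Int) + 1 + t.length) 1).foldl
      (fun (s : List Int × Int) i =>
        if PySem.List.pyGetD (pre ++ a :: t) i 0 = PySem.List.pyGetD (pre ++ a :: t) (i - 1) 0
        then (s.1, s.2 + 1) else (s.1 ++ [s.2], 1)) st
    = pvPairFold a t st := by
  induction t with
  | nil =>
    intro pre a st
    rw [PySem.List.pyRange_one_eq_nil (by simp)]
    simp [pvPairFold]
  | cons b t' ih =>
    intro pre a st
    rw [PySem.List.pyRange_one_cons (by simp only [List.length_cons]; push_cast; omega)]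
    have hL : pre ++ a :: b :: t' = (pre ++ [a]) ++ b :: t' := by simp
    simp only [List.foldl_cons]
    have h1 : PySem.List.pyGetD (pre ++ a :: b :: t') ((pre.length : Int) + 1 - 1) 0 = a := by
      have h := pvGetD_append_cons pre a (b :: t')
      rw [show ((pre.length : Int) + 1 - 1) = (pre.length : Int) by ring]
      exact h
    have h2 : PySem.List.pyGetD (pre ++ a :: b :: t') ((pre.length : Int) + 1) 0 = b := by
      rw [hL]
      simpa using pvGetD_append_cons (pre ++ [a]) b t'
    rw [h1, h2]
    have hb1 : ((pre.length : Int) + 1 + 1) = (((pre ++ [a]).length : Int) + 1) := by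
      simp
    have hb2 : ((pre.length : Int) + 1 + ((b :: t').length : Int)) = (((pre ++ [a]).length : Int) + 1 + (t'.length : Int)) := by
      simp only [List.length_cons, List.length_append, List.length_nil]
      push_cast; ring
    conv_rhs => rw [pvPairFold]
    rw [hb1, hb2, hL]
    exact ih (pre ++ [a]) b _

theorem pvKeyAt (positions : List (List Int)) (i : Int) (h0 : 0 ≤ i) (h1 : i < (positions.length : Int)) :
    PySem.List.pyGetD (PySem.List.pyGetD positions i []) 0 0
      = PySem.List.pyGetD (positions.map (fun p => PySem.List.pyGetD p 0 0)) i 0 := by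
  rw [PySem.List.pyGetD_eq_getElem positions [] h0 h1,
      PySem.List.pyGetD_eq_getElem (positions.map (fun p => PySem.List.pyGetD p 0 0)) 0 h0 (by simpa using h1)]
  simp

theorem a_eq_rle (positions : List (List Int)) :
    strand_domain_lens_py positions = pvRle (positions.map (fun p => PySem.List.pyGetD p 0 0)) := by
  match positions with
  | [] => simp [strand_domain_lens_py, pvRle]
  | q :: qs =>
    unfold strand_domain_lens_py
    rw [if_neg (by simp)]
    have hcongr := PySem.List.foldl_congr_mem
      (l := PySem.List.pyRange 1 (((q :: qs).length : Int)) 1)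
      (init := (([], (1 : Int)) : List Int × Int))
      (f := fun (s : List Int × Int) i =>
        if PySem.List.pyGetD (PySem.List.pyGetD (q :: qs) i []) 0 0
           = PySem.List.pyGetD (PySem.List.pyGetD (q :: qs) (i - 1) []) 0 0
        then (s.1, s.2 + 1) else (s.1 ++ [s.2], 1))
      (g := fun (s : List Int × Int) i =>
        if PySem.List.pyGetD ((q :: qs).map (fun p => PySem.List.pyGetD p 0 0)) i 0
           = PySem.List.pyGetD ((q :: qs).map (fun p => PySem.List.pyGetD p 0 0)) (i - 1) 0
        then (s.1, s.2 + 1) else (s.1 ++ [s.2], 1))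
      (by
        intro acc x hx
        rw [PySem.List.mem_pyRange_one] at hx
        simp only [pvKeyAt (q :: qs) x (by omega) hx.2,
            pvKeyAt (q :: qs) (x - 1) (by omega) (by omega)])
    rw [hcongr]
    have hmap : (q :: qs).map (fun p => PySem.List.pyGetD p 0 0)
        = PySem.List.pyGetD q 0 0 :: qs.map (fun p => PySem.List.pyGetD p 0 0) := by simp
    have hrange := pvFoldRange (qs.map (fun p => PySem.List.pyGetD p 0 0))
      [] (PySem.List.pyGetD q 0 0) (([], (1 : Int)) : List Int × Int)
    simp only [List.length_nil, Nat.cast_zero, zero_add, List.length_map, List.nil_append] at hrange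
    rw [hmap]
    have hlen : (((q :: qs).length : Int)) = 1 + (qs.length : Int) := by
      simp only [List.length_cons]; push_cast; ring
    rw [hlen]
    refine Eq.trans (congrArg (fun z : List Int × Int => z.1 ++ [z.2]) hrange) ?_
    simpa [pvRle] using pvPairFold_rleAux (qs.map (fun p => PySem.List.pyGetD p 0 0))
      (PySem.List.pyGetD q 0 0) (([], (1 : Int)) : List Int × Int)

-- ===== VERDICT (by name: the statement is the Claim_ definition above) =====
theorem strand_domain_lens_py_spec : Claim_equal_strand_domain_lens_py := by
  intro positions _ _
  unfold Spec_strand_domain_lens_py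
  rw [a_eq_rle positions, alt_eq_rle positions]
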